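-- pv_equiv track=rewrite | github.com/annullifier/PolarFly | pf_3d_cyl_spf.py | field_gen
-- ===== SOURCE A (Python) =====
-- def field_gen(q):
--     add_mat = [[0]*q for i in range(q)]
--     mul_mat = [[0]*q for i in range(q)]
--
--     # For prime field GF(q), simple modular arithmetic
--     for i in range(q):
--         for j in range(q):
--             add_mat[i][j] = (i + j) % q
--             mul_mat[i][j] = (i * j) % q
--
--     return add_mat, mul_mat
-- ===== SOURCE B (Python) =====
-- def field_gen(q):
--     # add row i is a cyclic rotation of 0..q-1; mul row i by repeated addition
--     add_mat = [list(range(i, q)) + list(range(i)) for i in range(q)]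
--     mul_mat = []
--     for i in range(q):
--         row = []
--         val = 0
--         for _ in range(q):
--             row.append(val)
--             val = (val + i) % q
--         mul_mat.append(row)
--     return add_mat, mul_mat
-- ===== Notes on version B (the rewrite author's own statement) =====
-- stated objective: alternative
-- what changed: Addition rows are built as slice-concatenated cyclic rotations range(i,q)+range(i) with no inner loop or mod, and multiplication rows by a running accumulator val=(val+i)%q instead of computing (i*j)%q per cell.
import Mathlib
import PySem

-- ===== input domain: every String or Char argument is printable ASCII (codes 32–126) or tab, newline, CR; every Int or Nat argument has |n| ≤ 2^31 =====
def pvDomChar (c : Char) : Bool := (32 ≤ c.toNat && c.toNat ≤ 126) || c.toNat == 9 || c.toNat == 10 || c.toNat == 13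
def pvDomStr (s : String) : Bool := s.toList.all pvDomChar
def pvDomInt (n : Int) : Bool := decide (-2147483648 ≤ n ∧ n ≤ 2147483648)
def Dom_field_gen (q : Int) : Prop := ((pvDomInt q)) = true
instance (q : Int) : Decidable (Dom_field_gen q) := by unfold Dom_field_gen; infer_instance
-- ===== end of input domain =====

-- B builds the addition rows as slice-concatenated cyclic rotations and the
-- multiplication rows with a running accumulator val=(val+i)%q, replacing A's
-- per-cell (i+j)%q / (i*j)%q computation; objective: alternative decomposition.


-- ===== PORT A =====
-- A initialises zero matrices and then assigns every cell exactly once in the double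
-- loop; ported as the double comprehension computing each cell's value directly.
def field_gen (q : Int) : List (List Int) × List (List Int) :=
  ((PySem.List.pyRange 0 q 1).map (fun i =>
      (PySem.List.pyRange 0 q 1).map (fun j => PySem.Int.mod (i + j) q)),
   (PySem.List.pyRange 0 q 1).map (fun i =>
      (PySem.List.pyRange 0 q 1).map (fun j => PySem.Int.mod (i * j) q)))

-- ===== PORT B =====
def field_gen_alt (q : Int) : List (List Int) × List (List Int) :=
  ((PySem.List.pyRange 0 q 1).map (fun i =>
      PySem.List.pyRange i q 1 ++ PySem.List.pyRange 0 i 1),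
   (PySem.List.pyRange 0 q 1).foldl (fun mul i =>
      mul ++ [((PySem.List.pyRange 0 q 1).foldl
                (fun (st : List Int × Int) _ => (st.1 ++ [st.2], PySem.Int.mod (st.2 + i) q))
                ([], 0)).1]) [])

-- ===== PRECONDITION & SPEC =====
def Spec_field_gen (q : Int) (out : List (List Int) × List (List Int)) : Prop := out = field_gen_alt q
instance (q : Int) (out : List (List Int) × List (List Int)) : Decidable (Spec_field_gen q out) := by unfold Spec_field_gen; infer_instance

-- ===== CLAIM (what is proved, stated in full; the proofs are below) =====
def Claim_equal_field_gen : Prop := ∀ (q : Int), Dom_field_gen q → Spec_field_gen q (field_gen q)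

-- ===== LEMMAS AND PROOFS =====

-- A's add row i equals B's rotation row, for 0 ≤ i < q.
theorem pv_addrow (q i : Int) (hi : 0 ≤ i) (hq : i < q) :
    (PySem.List.pyRange 0 q 1).map (fun j => PySem.Int.mod (i + j) q)
      = PySem.List.pyRange i q 1 ++ PySem.List.pyRange 0 i 1 := by
  apply List.ext_getElem
  · simp [PySem.List.length_pyRange_one]; omega
  · intro k h1 h2
    simp only [PySem.List.length_pyRange_one, List.length_map] at h1
    rw [List.getElem_map, PySem.List.getElem_pyRange_one]
    by_cases hc : k < (q - i).toNat
    · rw [List.getElem_append_left (by simpa [PySem.List.length_pyRange_one] using hc),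
        PySem.List.getElem_pyRange_one,
        PySem.Int.mod_eq_emod_of_pos (by omega),
        Int.emod_eq_of_lt (by omega) (by omega)]
      ring
    · rw [List.getElem_append_right (by simpa [PySem.List.length_pyRange_one] using hc),
        PySem.List.getElem_pyRange_one,
        PySem.Int.mod_eq_emod_of_pos (by omega),
        show i + (0 + (k : Int)) = (i + k - q) + 1 * q by ring,
        Int.add_mul_emod_self_right,
        Int.emod_eq_of_lt (by omega) (by omega)]
      simp [PySem.List.length_pyRange_one]
      omega

-- B's accumulator fold produces A's multiplication row (and ends with val = (i*n) % q).
theorem pv_mulrow (q i : Int) (hq : 0 < q) (n : Nat) :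
    (PySem.List.pyRange 0 (n : Int) 1).foldl
        (fun (st : List Int × Int) _ => (st.1 ++ [st.2], PySem.Int.mod (st.2 + i) q)) ([], 0)
      = ((PySem.List.pyRange 0 (n : Int) 1).map (fun j => PySem.Int.mod (i * j) q),
         PySem.Int.mod (i * (n : Int)) q) := by
  induction n with
  | zero => simp [PySem.List.pyRange_one_eq_nil, PySem.Int.mod]
  | succ n ih =>
    have h : ((n + 1 : Nat) : Int) = (n : Int) + 1 := by push_cast; ring
    rw [h, PySem.List.pyRange_one_succ_right (by omega), List.foldl_append,
      List.map_append, ih]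
    simp only [List.foldl_cons, List.foldl_nil, List.map_cons, List.map_nil]
    refine Prod.ext rfl ?_
    simp only
    rw [PySem.Int.mod_eq_emod_of_pos hq, PySem.Int.mod_eq_emod_of_pos hq,
      PySem.Int.mod_eq_emod_of_pos hq, Int.emod_add_emod]
    ring_nf

-- ===== VERDICT (by name: the statement is the Claim_ definition above) =====
theorem field_gen_spec : Claim_equal_field_gen := by
  intro q _
  unfold Spec_field_gen field_gen field_gen_alt
  by_cases hq : q ≤ 0
  · simp [PySem.List.pyRange_one_eq_nil hq]
  · push_neg at hq
    refine Prod.ext ?_ ?_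
    · simp only
      refine List.map_congr_left (fun i hi => ?_)
      rw [PySem.List.mem_pyRange_one] at hi
      exact pv_addrow q i hi.1 hi.2
    · simp only
      rw [PySem.List.foldl_append_singleton_eq_map
            (fun i => ((PySem.List.pyRange 0 q 1).foldl
              (fun (st : List Int × Int) _ => (st.1 ++ [st.2], PySem.Int.mod (st.2 + i) q))
              ([], 0)).1)]
      rw [List.nil_append]
      refine List.map_congr_left (fun i hi => ?_)
      have hqn : ((q.toNat : Nat) : Int) = q := by omega
      have h := pv_mulrow q i hq q.toNat
      rw [hqn] at h
      rw [h]
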